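-- pv_equiv track=rewrite | github.com/kavwad/clippertv | src/clippertv/analytics/comparison.py | _fill_month_gaps
-- ===== SOURCE A (Python) =====
-- def _fill_month_gaps(sorted_periods: list[str]) -> list[str]:
--     """Given sorted YYYY-MM strings, fill in any missing months."""
--     if len(sorted_periods) <= 1:
--         return sorted_periods
--
--     start_y, start_m = map(int, sorted_periods[0].split("-"))
--     end_y, end_m = map(int, sorted_periods[-1].split("-"))
--
--     result = []
--     y, m = start_y, start_m
--     while (y, m) <= (end_y, end_m):
--         result.append(f"{y:04d}-{m:02d}")
--         m += 1
--         if m > 12: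
--             m = 1
--             y += 1
--     return result
-- ===== SOURCE B (Python) =====
-- def _fill_month_gaps(sorted_periods: list[str]) -> list[str]:
--     """Given sorted YYYY-MM strings, fill in any missing months."""
--     if len(sorted_periods) <= 1:
--         return sorted_periods
--
--     start_y, start_m = map(int, sorted_periods[0].split("-"))
--     end_y, end_m = map(int, sorted_periods[-1].split("-"))
--
--     start = start_y * 12 + (start_m - 1)
--     end = end_y * 12 + (end_m - 1)
--     return [f"{idx // 12:04d}-{idx % 12 + 1:02d}" for idx in range(start, end + 1)]
-- ===== Notes on version B (the rewrite author's own statement) =====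
-- stated objective: simpler
-- what changed: Replaces the stateful (year, month) while-loop with carry logic by a comprehension over a linear month index range(start_y*12+start_m-1, end_y*12+end_m-1+1), recovering each month with divmod.
import Mathlib
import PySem

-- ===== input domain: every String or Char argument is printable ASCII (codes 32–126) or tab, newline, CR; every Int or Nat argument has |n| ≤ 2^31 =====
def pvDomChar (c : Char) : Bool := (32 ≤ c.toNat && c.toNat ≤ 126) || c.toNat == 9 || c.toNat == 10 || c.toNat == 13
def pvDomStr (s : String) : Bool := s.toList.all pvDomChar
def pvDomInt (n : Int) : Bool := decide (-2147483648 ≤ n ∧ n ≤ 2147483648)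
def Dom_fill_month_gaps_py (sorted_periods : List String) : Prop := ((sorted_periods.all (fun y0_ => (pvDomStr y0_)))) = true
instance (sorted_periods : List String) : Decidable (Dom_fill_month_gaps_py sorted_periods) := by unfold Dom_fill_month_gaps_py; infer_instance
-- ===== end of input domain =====

-- B fills the month gap via a comprehension over a linear month index (y*12+m-1) instead of
-- A's stateful (year, month) while-loop with a carry; objective: simpler (same cost).


-- ===== PORT A =====
-- shared with B: f"{y:04d}-{m:02d}" (y, m never negative here: '-'-split parts carry no sign)
def pvFmt (y m : Int) : String :=
  String.ofList (PySem.Chars.zfill (PySem.Int.toChars y) 4 ++ '-' :: PySem.Chars.zfill (PySem.Int.toChars m) 2)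

-- shared with B: `a, b = map(int, s.split("-"))`; none exactly where Python raises
def pvParseYM (s : String) : Option (Int × Int) :=
  match PySem.Str.split? s "-" with
  | some [a, b] =>
    match PySem.Int.ofStr? a, PySem.Int.ofStr? b with
    | some y, some m => some (y, m)
    | _, _ => none
  | _ => none

-- A's while-loop: tuple comparison (y, m) <= (ey, em), month carry by hand
def pvLoopA (y m ey em : Int) : List String :=
  if y < ey ∨ (y = ey ∧ m ≤ em) then
    pvFmt y m ::
      (if m + 1 > 12 then pvLoopA (y + 1) 1 ey em else pvLoopA y (m + 1) ey em)
  else []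
termination_by ((ey + 1 - y).toNat, (13 - m).toNat)
decreasing_by
  · apply Prod.Lex.left; omega
  · apply Prod.Lex.right; omega

def fill_month_gaps_py (sorted_periods : List String) : List String :=
  if sorted_periods.length ≤ 1 then sorted_periods
  else
    match PySem.List.pyGet? sorted_periods 0, PySem.List.pyGet? sorted_periods (-1) with
    | some s0, some sl =>
      match pvParseYM s0, pvParseYM sl with
      | some (sy, sm), some (ey, em) => pvLoopA sy sm ey em
      | _, _ => []   -- Python raises (ValueError/unpack error); excluded by Pre_
    | _, _ => []     -- unreachable: length ≥ 2

-- ===== PORT B =====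
-- f"{idx // 12:04d}-{idx % 12 + 1:02d}"
def pvFmtIdx (idx : Int) : String :=
  pvFmt (PySem.Int.floordiv idx 12) (PySem.Int.mod idx 12 + 1)

def fill_month_gaps_py_alt (sorted_periods : List String) : List String :=
  if sorted_periods.length ≤ 1 then sorted_periods
  else
    match PySem.List.pyGet? sorted_periods 0, PySem.List.pyGet? sorted_periods (-1) with
    | some s0, some sl =>
      match pvParseYM s0, pvParseYM sl with
      | some (sy, sm), some (ey, em) =>
        (PySem.List.pyRange (sy * 12 + (sm - 1)) (ey * 12 + (em - 1) + 1) 1).map pvFmtIdx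
      | _, _ => []
    | _, _ => []

-- ===== PRECONDITION & SPEC =====
def pvMonthsOk (sp : List String) : Bool :=
  match PySem.List.pyGet? sp 0, PySem.List.pyGet? sp (-1) with
  | some s0, some sl =>
    match pvParseYM s0, pvParseYM sl with
    | some (_, sm), some (_, em) => decide ((1 ≤ sm ∧ sm ≤ 12) ∧ (1 ≤ em ∧ em ≤ 12))
    | _, _ => false
  | _, _ => false

-- Pre_ excludes (a) inputs where A raises ValueError (first/last element not two int()-parseable
-- '-'-separated fields) and (b) inputs whose first/last month field parses outside 1..12 — there
-- A's tuple-comparison loop emits out-of-range month strings and neither output is specified.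
def Pre_fill_month_gaps_py (sorted_periods : List String) : Prop :=
  sorted_periods.length ≤ 1 ∨ pvMonthsOk sorted_periods = true
instance (sorted_periods : List String) : Decidable (Pre_fill_month_gaps_py sorted_periods) := by
  unfold Pre_fill_month_gaps_py; infer_instance

def pvWitness_fill_month_gaps_py : List String := ["2020-11", "2021-02"]

def Spec_fill_month_gaps_py (sorted_periods : List String) (out : List String) : Prop :=
  out = fill_month_gaps_py_alt sorted_periods
instance (sorted_periods : List String) (out : List String) : Decidable (Spec_fill_month_gaps_py sorted_periods out) := by
  unfold Spec_fill_month_gaps_py; infer_instance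

-- ===== CLAIM (what is proved, stated in full; the proofs are below) =====
def Claim_equal_fill_month_gaps_py : Prop := ∀ (sorted_periods : List String), Dom_fill_month_gaps_py sorted_periods → Pre_fill_month_gaps_py sorted_periods → Spec_fill_month_gaps_py sorted_periods (fill_month_gaps_py sorted_periods)

-- ===== LEMMAS AND PROOFS =====

lemma pvFmtIdx_eq (y m : Int) (h1 : 0 ≤ m - 1) (h2 : m - 1 < 12) :
    pvFmtIdx (y * 12 + (m - 1)) = pvFmt y m := by
  unfold pvFmtIdx
  have hd : PySem.Int.floordiv (y * 12 + (m - 1)) 12 = y := by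
    rw [PySem.Int.floordiv_eq_iff_of_pos (by norm_num)]; omega
  have hm : PySem.Int.mod (y * 12 + (m - 1)) 12 = m - 1 := by
    have := PySem.Int.floordiv_mul_add_mod (y * 12 + (m - 1)) 12
    rw [hd] at this; omega
  rw [hd, hm]; congr 1; omega

lemma pvLoopA_eq (ey em : Int) (hem : 1 ≤ em ∧ em ≤ 12) (y m : Int) :
    1 ≤ m → m ≤ 12 →
    pvLoopA y m ey em
      = (PySem.List.pyRange (y * 12 + (m - 1)) (ey * 12 + (em - 1) + 1) 1).map pvFmtIdx := by
  induction y, m using pvLoopA.induct ey em with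
  | case1 y m hg ih1 ih2 =>
    intro h1 h2
    have hlt : y * 12 + (m - 1) < ey * 12 + (em - 1) + 1 := by
      rcases hg with h | ⟨h, h'⟩ <;> omega
    rw [pvLoopA, if_pos hg, PySem.List.pyRange_one_cons hlt, List.map_cons,
      pvFmtIdx_eq y m (by omega) (by omega)]
    have htail : (if m + 1 > 12 then pvLoopA (y + 1) 1 ey em else pvLoopA y (m + 1) ey em)
        = (PySem.List.pyRange (y * 12 + (m - 1) + 1) (ey * 12 + (em - 1) + 1) 1).map pvFmtIdx := by
      by_cases hc : m + 1 > 12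
      · have hm12 : m = 12 := by omega
        have harg : (y + 1) * 12 + (1 - 1) = y * 12 + (m - 1) + 1 := by omega
        rw [if_pos hc, ih1 (by omega) (by omega), harg]
      · have harg : y * 12 + (m + 1 - 1) = y * 12 + (m - 1) + 1 := by omega
        rw [if_neg hc, ih2 hc (by omega) (by omega), harg]
    rw [htail]
  | case2 y m hg =>
    intro h1 h2
    rw [pvLoopA, if_neg hg, PySem.List.pyRange_one_eq_nil (by omega), List.map_nil]

-- ===== VERDICT (by name: the statement is the Claim_ definition above) =====
theorem fill_month_gaps_py_spec : Claim_equal_fill_month_gaps_py := by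
  intro sp _ hpre
  unfold Spec_fill_month_gaps_py fill_month_gaps_py fill_month_gaps_py_alt
  by_cases hlen : sp.length ≤ 1
  · simp [hlen]
  · rw [if_neg hlen, if_neg hlen]
    rcases hpre with h | h
    · exact absurd h hlen
    · unfold pvMonthsOk at h
      split at h
      · split at h
        · simp only [decide_eq_true_eq] at h
          exact pvLoopA_eq _ _ ⟨h.2.1, h.2.2⟩ _ _ h.1.1 h.1.2
        · simp at h
      · simp at h
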